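-- pv_equiv track=rewrite | github.com/brainail/.happy-coooding | Interview/.codefights/calculateBasins.py | calculateBasins
-- ===== SOURCE A (Python) =====
-- from collections import Counter as cntr
--
-- def calculateBasins(grid):
--     n, basins = len(grid), [u for u in range(len(grid)**2)]
--
--     # disjoint-set-union help methods
--     def find(u): return u if basins[u] == u else find(basins[u])
--
--     def union(u, v): basins[find(v)] = find(u)
--
--     # union edges using disjoint-set-union
--     for i in range(n):
--         for j in range(n):
--             mini, minj = get_min(grid, i, j, n)
--             union(i*n + j, mini*n + minj)
--
--     # count and sort
--     return sorted(cntr(find(u) for u in range(n*n)).values(), reverse=True)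
--
-- def get_min(grid, i, j, n):
--     mini, minj = i, j
--     if i > 0 and grid[i-1][j] < grid[mini][minj]:
--         mini, minj = i - 1, j
--     if i < n-1 and grid[i+1][j] < grid[mini][minj]:
--         mini, minj = i + 1, j
--     if j > 0 and grid[i][j-1] < grid[mini][minj]:
--         mini, minj = i, j - 1
--     if j < n-1 and grid[i][j+1] < grid[mini][minj]:
--         mini, minj = i, j + 1
--     return mini, minj
-- ===== SOURCE B (Python) =====
-- def calculateBasins(grid):
--     # Per-cell steepest-descent walk to its local minimum (no parent array, no unions).
--     n = len(grid)
--     counts = {}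
--     for i in range(n):
--         for j in range(n):
--             ci, cj = i, j
--             while True:
--                 mi, mj = _step(grid, ci, cj, n)
--                 if (mi, mj) == (ci, cj):
--                     break
--                 ci, cj = mi, mj
--             key = (ci, cj)
--             counts[key] = counts.get(key, 0) + 1
--     return sorted(counts.values(), reverse=True)
--
-- def _step(grid, i, j, n):
--     nbrs = []
--     if i > 0:
--         nbrs.append((i - 1, j))
--     if i < n - 1:
--         nbrs.append((i + 1, j))
--     if j > 0:
--         nbrs.append((i, j - 1))
--     if j < n - 1:
--         nbrs.append((i, j + 1))
--     if not nbrs: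
--         return (i, j)
--     mi, mj = min(nbrs, key=lambda c: grid[c[0]][c[1]])
--     return (mi, mj) if grid[mi][mj] < grid[i][j] else (i, j)
-- ===== Notes on version B (the rewrite author's own statement) =====
-- stated objective: alternative
-- what changed: Replaces the disjoint-set-union over steepest-descent edges (parent array, recursive find, Counter of roots) by a per-cell steepest-descent walk that repeatedly moves to the strictly lowest neighbour until none is lower and counts the sinks directly; Pre_ excludes only grids with at least 2 rows and a row shorter than len(grid), on which both A and B raise IndexError.
import Mathlib
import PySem

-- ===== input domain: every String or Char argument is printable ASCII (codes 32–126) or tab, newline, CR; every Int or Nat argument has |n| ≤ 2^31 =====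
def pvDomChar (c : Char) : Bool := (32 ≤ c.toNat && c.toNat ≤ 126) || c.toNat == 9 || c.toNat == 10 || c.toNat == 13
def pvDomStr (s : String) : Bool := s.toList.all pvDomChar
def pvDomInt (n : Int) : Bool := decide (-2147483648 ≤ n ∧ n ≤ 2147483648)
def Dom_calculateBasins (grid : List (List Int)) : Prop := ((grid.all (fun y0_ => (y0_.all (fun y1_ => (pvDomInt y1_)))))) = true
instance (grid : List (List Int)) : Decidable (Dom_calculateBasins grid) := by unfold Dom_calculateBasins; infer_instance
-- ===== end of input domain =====

-- B replaces A's disjoint-set union over steepest-descent edges by a per-cell walk along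
-- lowest neighbours to its local minimum (objective: alternative; not faster).

-- ===== PORT A =====

-- grid[a][b] in total form (indices are always in range under Pre_)
def pvCell (grid : List (List Int)) (a b : Int) : Int :=
  PySem.List.pyGetD (PySem.List.pyGetD grid a []) b 0

-- get_min(grid, i, j, n): the four sequential strict-< updates of A
def pvGetMin (grid : List (List Int)) (i j n : Int) : Int × Int :=
  let mi := i; let mj := j
  let p1 : Int × Int := if i > 0 ∧ pvCell grid (i-1) j < pvCell grid mi mj then (i-1, j) else (mi, mj)
  let p2 : Int × Int := if i < n-1 ∧ pvCell grid (i+1) j < pvCell grid p1.1 p1.2 then (i+1, j) else p1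
  let p3 : Int × Int := if j > 0 ∧ pvCell grid i (j-1) < pvCell grid p2.1 p2.2 then (i, j-1) else p2
  if j < n-1 ∧ pvCell grid i (j+1) < pvCell grid p3.1 p3.2 then (i, j+1) else p3

-- find(u): return u if basins[u] == u else find(basins[u])   (fuel: chain length is < len(basins)+1)
def pvFindA (basins : List Int) : Nat → Int → Int
  | 0, u => u
  | fuel+1, u =>
    match PySem.List.pyGet? basins u with
    | none => u          -- IndexError: unreachable, finds stay inside the parent array
    | some p => if p = u then u else pvFindA basins fuel p

-- union(u, v): basins[find(v)] = find(u)
def pvUnionStep (basins : List Int) (u v : Int) : List Int :=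
  PySem.List.pySetD basins (pvFindA basins (basins.length+1) v) (pvFindA basins (basins.length+1) u)

def calculateBasins (grid : List (List Int)) : List Int :=
  let n : Int := PySem.List.len grid
  let basins0 : List Int := PySem.List.pyRange 0 (n^2) 1
  let basins := (PySem.List.pyRange 0 n 1).foldl (fun b i =>
    (PySem.List.pyRange 0 n 1).foldl (fun b j =>
      let mm := pvGetMin grid i j n
      pvUnionStep b (i*n + j) (mm.1*n + mm.2)) b) basins0
  PySem.List.sorted
    (PySem.Dict.counter ((PySem.List.pyRange 0 (n*n) 1).map
      (fun u => pvFindA basins (basins.length+1) u))).values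
    (fun x => x) true

-- ===== PORT B =====

-- _step(grid, i, j, n): min over the existing neighbours keyed by height (first minimum wins),
-- taken only if strictly lower than the current cell; a cell with no neighbours is its own sink.
def pvLowest (grid : List (List Int)) (i j n : Int) : Int × Int :=
  let nbrs : List (Int × Int) :=
    (if i > 0 then [(i-1, j)] else []) ++ (if i < n-1 then [(i+1, j)] else [])
      ++ (if j > 0 then [(i, j-1)] else []) ++ (if j < n-1 then [(i, j+1)] else [])
  if nbrs = [] then (i, j)
  else
    let m := PySem.List.minD nbrs (fun c => pvCell grid c.1 c.2) (i, j)
    if pvCell grid m.1 m.2 < pvCell grid i j then m else (i, j)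

-- the while-loop walk to the local minimum (fuel: a descent chain visits < n*n+1 distinct cells)
def pvChase (grid : List (List Int)) (n : Int) : Nat → Int × Int → Int × Int
  | 0, c => c          -- fuel exhausted: unreachable
  | fuel+1, c =>
    let m := pvLowest grid c.1 c.2 n
    if m = c then c else pvChase grid n fuel m

def calculateBasins_alt (grid : List (List Int)) : List Int :=
  let n : Int := PySem.List.len grid
  let counts := (PySem.List.pyRange 0 n 1).foldl (fun d i =>
    (PySem.List.pyRange 0 n 1).foldl (fun d j =>
      let key := pvChase grid n (grid.length * grid.length + 1) (i, j)
      d.insert key (d.getD key 0 + 1)) d) (PySem.Dict.empty)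
  PySem.List.sorted counts.values (fun x => x) true

-- ===== PRECONDITION & SPEC =====
-- A raises IndexError exactly on grids with at least 2 rows and some row shorter than len(grid)
-- (B raises there too); 0- or 1-row grids never read a short row in A, and are inside Pre_.
def Pre_calculateBasins (grid : List (List Int)) : Prop :=
  grid.length ≤ 1 ∨ ∀ row ∈ grid, grid.length ≤ row.length
instance (grid : List (List Int)) : Decidable (Pre_calculateBasins grid) := by
  unfold Pre_calculateBasins; infer_instance

def pvWitness_calculateBasins : List (List Int) := [[1, 2], [0, 3]]

def Spec_calculateBasins (grid : List (List Int)) (out : List Int) : Prop := out = calculateBasins_alt grid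
instance (grid : List (List Int)) (out : List Int) : Decidable (Spec_calculateBasins grid out) := by unfold Spec_calculateBasins; infer_instance

-- ===== CLAIM (what is proved, stated in full; the proofs are below) =====
def Claim_equal_calculateBasins : Prop := ∀ (grid : List (List Int)), Dom_calculateBasins grid → Pre_calculateBasins grid → Spec_calculateBasins grid (calculateBasins grid)

-- ===== LEMMAS AND PROOFS =====

-- ---------- proof-side abstractions ----------

-- number of cells
def pvNN (grid : List (List Int)) : Nat := grid.length * grid.length

-- cell id <-> coordinate pair
def pvEncK (n : Nat) (c : Int × Int) : Int := c.1 * (n : Int) + c.2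
def pvDecK (n : Nat) (z : Int) : Int × Int := (z / (n : Int), z % (n : Int))

-- the steepest-descent successor on ids (identity off the board)
def pvFm (grid : List (List Int)) (z : Int) : Int :=
  if 0 ≤ z ∧ z < (pvNN grid : Int) then
    pvEncK grid.length (pvGetMin grid (pvDecK grid.length z).1 (pvDecK grid.length z).2 (grid.length : Int))
  else z

-- the successor restricted to ids < m (the edges A has already processed)
def pvGm (grid : List (List Int)) (m : Nat) (z : Int) : Int :=
  if 0 ≤ z ∧ z < (m : Int) ∧ pvFm grid z ≠ z then pvFm grid z else z

-- height of a cell id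
def pvHt (grid : List (List Int)) (z : Int) : Int :=
  pvCell grid (pvDecK grid.length z).1 (pvDecK grid.length z).2

-- the parent-pointer function of A's basins array
def pvPf (b : List Int) (z : Int) : Int := PySem.List.pyGetD b z z

-- stabilised values: A's root and the chase sink after m processed cells
def pvRootm (grid : List (List Int)) (b : List Int) (z : Int) : Int := (pvPf b)^[pvNN grid] z
def pvCm (grid : List (List Int)) (m : Nat) (z : Int) : Int := (pvGm grid m)^[pvNN grid] z

-- the invariant of A's union loop after the first m cells
def pvInv (grid : List (List Int)) (m : Nat) (b : List Int) : Prop :=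
  b.length = pvNN grid ∧
  (∀ z, 0 ≤ z → z < (pvNN grid : Int) → 0 ≤ pvPf b z ∧ pvPf b z < (pvNN grid : Int)) ∧
  (∀ z, 0 ≤ z → z < (pvNN grid : Int) → (pvPf b)^[m] z = (pvPf b)^[m+1] z) ∧
  (∀ x y, 0 ≤ x → x < (pvNN grid : Int) → 0 ≤ y → y < (pvNN grid : Int) →
    (pvRootm grid b x = pvRootm grid b y ↔ pvCm grid m x = pvCm grid m y))

-- ---------- generic iterate lemmas ----------

theorem pvAbsorb {g : Int → Int} {z : Int} {M k : Nat}
    (h : g^[M] z = g^[M+1] z) (hk : M ≤ k) : g^[k] z = g^[M] z := by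
  obtain ⟨t, rfl⟩ := Nat.exists_eq_add_of_le hk
  induction t with
  | zero => rfl
  | succ t ih =>
    have : M + (t+1) = (M + t) + 1 := by omega
    rw [this, Function.iterate_succ_apply', ih (by omega)]
    calc g (g^[M] z) = g^[M+1] z := (Function.iterate_succ_apply' g M z).symm
    _ = g^[M] z := h.symm

-- ---------- id/pair arithmetic ----------

theorem pvDec_enc {n : Nat} {c : Int × Int}
    (h1 : 0 ≤ c.1) (h2 : c.1 < (n:Int)) (h3 : 0 ≤ c.2) (h4 : c.2 < (n:Int)) :
    pvDecK n (pvEncK n c) = c := by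
  have hn : (n:Int) ≠ 0 := by omega
  unfold pvDecK pvEncK
  have hd : (c.1 * (n:Int) + c.2) / (n:Int) = c.1 := by
    rw [add_comm, Int.add_mul_ediv_right _ _ hn, Int.ediv_eq_zero_of_lt h3 h4, zero_add]
  have hm : (c.1 * (n:Int) + c.2) % (n:Int) = c.2 := by
    rw [add_comm, Int.add_mul_emod_self_right]
    exact Int.emod_eq_of_lt h3 h4
  rw [hd, hm]

theorem pvEnc_range {n : Nat} {c : Int × Int}
    (h1 : 0 ≤ c.1) (h2 : c.1 < (n:Int)) (h3 : 0 ≤ c.2) (h4 : c.2 < (n:Int)) :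
    0 ≤ pvEncK n c ∧ pvEncK n c < ((n*n : Nat) : Int) := by
  unfold pvEncK
  constructor
  · positivity
  · push_cast
    nlinarith

theorem pvDec_range {n : Nat} {z : Int}
    (h1 : 0 ≤ z) (h2 : z < ((n*n : Nat) : Int)) :
    0 ≤ (pvDecK n z).1 ∧ (pvDecK n z).1 < (n:Int) ∧ 0 ≤ (pvDecK n z).2 ∧ (pvDecK n z).2 < (n:Int) := by
  have hn : (0:Int) < (n:Int) := by
    by_contra h
    have : n = 0 := by omega
    subst this; simp at h2; omega
  unfold pvDecK
  refine ⟨Int.ediv_nonneg h1 (le_of_lt hn), ?_, Int.emod_nonneg z (by omega), Int.emod_lt_of_pos z hn⟩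
  rw [Int.ediv_lt_iff_lt_mul hn]
  push_cast at h2; linarith

theorem pvEnc_dec {n : Nat} {z : Int} : pvEncK n (pvDecK n z) = z := by
  unfold pvEncK pvDecK
  simp [Int.ediv_mul_add_emod]

-- ---------- get_min facts ----------

theorem pvGetMin_valid (grid : List (List Int)) {i j : Int} {n : Nat}
    (h1 : 0 ≤ i) (h2 : i < (n:Int)) (h3 : 0 ≤ j) (h4 : j < (n:Int)) :
    0 ≤ (pvGetMin grid i j (n:Int)).1 ∧ (pvGetMin grid i j (n:Int)).1 < (n:Int) ∧
    0 ≤ (pvGetMin grid i j (n:Int)).2 ∧ (pvGetMin grid i j (n:Int)).2 < (n:Int) := by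
  unfold pvGetMin
  dsimp only
  split_ifs <;> simp_all <;> omega

theorem pvGetMin_le (grid : List (List Int)) (i j nI : Int) :
    pvCell grid (pvGetMin grid i j nI).1 (pvGetMin grid i j nI).2 ≤ pvCell grid i j := by
  unfold pvGetMin
  dsimp only
  split_ifs <;> simp_all <;> linarith

theorem pvGetMin_lt (grid : List (List Int)) (i j nI : Int)
    (hne : pvGetMin grid i j nI ≠ (i, j)) :
    pvCell grid (pvGetMin grid i j nI).1 (pvGetMin grid i j nI).2 < pvCell grid i j := by
  unfold pvGetMin at hne ⊢
  dsimp only at hne ⊢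
  split_ifs at hne ⊢ <;> simp_all <;> linarith

-- ---------- pvFm facts ----------

theorem pvFm_out (grid : List (List Int)) {z : Int}
    (h : ¬(0 ≤ z ∧ z < (pvNN grid : Int))) : pvFm grid z = z := by
  unfold pvFm; rw [if_neg h]

theorem pvFm_range (grid : List (List Int)) {z : Int}
    (h1 : 0 ≤ z) (h2 : z < (pvNN grid : Int)) :
    0 ≤ pvFm grid z ∧ pvFm grid z < (pvNN grid : Int) := by
  have hd := pvDec_range (n := grid.length) h1 (by exact_mod_cast h2)
  have hv := pvGetMin_valid grid (n := grid.length) hd.1 hd.2.1 hd.2.2.1 hd.2.2.2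
  have he := pvEnc_range (n := grid.length) hv.1 hv.2.1 hv.2.2.1 hv.2.2.2
  unfold pvFm
  rw [if_pos ⟨h1, h2⟩]
  exact ⟨he.1, by exact_mod_cast he.2⟩

theorem pvHt_fm_le (grid : List (List Int)) (z : Int) :
    pvHt grid (pvFm grid z) ≤ pvHt grid z := by
  by_cases h : 0 ≤ z ∧ z < (pvNN grid : Int)
  · have hd := pvDec_range (n := grid.length) h.1 (by exact_mod_cast h.2)
    have hv := pvGetMin_valid grid (n := grid.length) hd.1 hd.2.1 hd.2.2.1 hd.2.2.2
    unfold pvFm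
    rw [if_pos h]
    unfold pvHt
    rw [pvDec_enc hv.1 hv.2.1 hv.2.2.1 hv.2.2.2]
    exact pvGetMin_le grid _ _ _
  · rw [pvFm_out grid h]

theorem pvHt_fm_lt (grid : List (List Int)) {z : Int} (hne : pvFm grid z ≠ z) :
    pvHt grid (pvFm grid z) < pvHt grid z := by
  by_cases h : 0 ≤ z ∧ z < (pvNN grid : Int)
  · have hd := pvDec_range (n := grid.length) h.1 (by exact_mod_cast h.2)
    have hv := pvGetMin_valid grid (n := grid.length) hd.1 hd.2.1 hd.2.2.1 hd.2.2.2
    have hgm : pvGetMin grid (pvDecK grid.length z).1 (pvDecK grid.length z).2 (grid.length:Int) ≠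
        ((pvDecK grid.length z).1, (pvDecK grid.length z).2) := by
      intro hEq
      apply hne
      unfold pvFm
      rw [if_pos h]
      unfold pvEncK
      rw [hEq]
      have := pvEnc_dec (n := grid.length) (z := z)
      unfold pvEncK at this
      exact this
    unfold pvFm at hne ⊢
    rw [if_pos h] at hne ⊢
    unfold pvHt
    rw [pvDec_enc hv.1 hv.2.1 hv.2.2.1 hv.2.2.2]
    exact pvGetMin_lt grid _ _ _ hgm
  · exact absurd (pvFm_out grid h) hne

-- ---------- pvGm facts ----------

theorem pvGm_eq_fm (grid : List (List Int)) :
    pvGm grid (pvNN grid) = pvFm grid := by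
  funext z
  unfold pvGm
  by_cases h : 0 ≤ z ∧ z < (pvNN grid : Int) ∧ pvFm grid z ≠ z
  · rw [if_pos h]
  · rw [if_neg h]
    by_cases h2 : 0 ≤ z ∧ z < (pvNN grid : Int)
    · by_cases h3 : pvFm grid z = z
      · exact h3.symm
      · exact absurd ⟨h2.1, h2.2, h3⟩ h
    · exact (pvFm_out grid h2).symm

theorem pvGm_move (grid : List (List Int)) {m : Nat} {z : Int}
    (hne : pvGm grid m z ≠ z) :
    (0 ≤ z ∧ z < (m:Int) ∧ pvFm grid z ≠ z) ∧ pvGm grid m z = pvFm grid z := by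
  unfold pvGm at hne ⊢
  by_cases h : 0 ≤ z ∧ z < (m:Int) ∧ pvFm grid z ≠ z
  · rw [if_pos h]; exact ⟨h, rfl⟩
  · rw [if_neg h] at hne; exact absurd rfl hne

theorem pvHt_gm_le (grid : List (List Int)) (m : Nat) (z : Int) :
    pvHt grid (pvGm grid m z) ≤ pvHt grid z := by
  by_cases hne : pvGm grid m z = z
  · rw [hne]
  · rw [(pvGm_move grid hne).2]; exact pvHt_fm_le grid z

theorem pvHt_gm_lt (grid : List (List Int)) {m : Nat} {z : Int}
    (hne : pvGm grid m z ≠ z) :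
    pvHt grid (pvGm grid m z) < pvHt grid z := by
  obtain ⟨hc, he⟩ := pvGm_move grid hne
  rw [he]; exact pvHt_fm_lt grid hc.2.2

theorem pvHt_gm_iter_le (grid : List (List Int)) (m : Nat) (k : Nat) (z : Int) :
    pvHt grid ((pvGm grid m)^[k] z) ≤ pvHt grid z := by
  induction k with
  | zero => rfl
  | succ k ih =>
    rw [Function.iterate_succ_apply']
    exact le_trans (pvHt_gm_le grid m _) ih

-- ---------- stabilisation of the chase maps (pigeonhole on strictly falling heights) ----------

theorem pvStabG (grid : List (List Int)) (m : Nat) (hm : m ≤ pvNN grid) (z : Int) :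
    (pvGm grid m)^[pvNN grid] z = (pvGm grid m)^[pvNN grid + 1] z := by
  set g := pvGm grid m with hg
  set N := pvNN grid with hN
  by_contra hne
  have hmv : ∀ k, k ≤ N → g^[k] z ≠ g^[k+1] z := by
    intro k hk hfix
    exact hne ((pvAbsorb hfix hk).trans (pvAbsorb hfix (by omega)).symm)
  have hstep : ∀ k, k ≤ N → g (g^[k] z) ≠ g^[k] z := by
    intro k hk
    have := hmv k hk
    rw [Function.iterate_succ_apply'] at this
    exact fun h => this (h.symm)
  have hdec : ∀ k, k ≤ N → pvHt grid (g^[k+1] z) < pvHt grid (g^[k] z) := by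
    intro k hk
    rw [Function.iterate_succ_apply']
    exact pvHt_gm_lt grid (hstep k hk)
  have hchain : ∀ a t, a + t + 1 ≤ N + 1 → pvHt grid (g^[a+t+1] z) < pvHt grid (g^[a] z) := by
    intro a t
    induction t with
    | zero => intro h; exact hdec a (by omega)
    | succ t ih =>
      intro h
      have h1 : a + (t+1) + 1 = (a + t + 1) + 1 := by omega
      rw [h1]
      exact lt_trans (hdec (a+t+1) (by omega)) (ih (by omega))
  have hlt : ∀ a b, a < b → b ≤ N + 1 → pvHt grid (g^[b] z) < pvHt grid (g^[a] z) := by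
    intro a b hab hbN
    obtain ⟨t, rfl⟩ : ∃ t, b = a + t + 1 := ⟨b - a - 1, by omega⟩
    exact hchain a t hbN
  have hmem : ∀ k, k ≤ N → g^[k+1] z ∈ Finset.Ico (0:Int) (N:Int) := by
    intro k hk
    rw [Finset.mem_Ico, Function.iterate_succ_apply']
    have hw := hstep k hk
    obtain ⟨hc, he⟩ := pvGm_move grid hw
    rw [show g (g^[k] z) = pvGm grid m (g^[k] z) from rfl, he]
    exact pvFm_range grid hc.1 (lt_of_lt_of_le hc.2.1 (by exact_mod_cast hm))
  have hinj : Set.InjOn (fun k : Fin (N+1) => g^[(k:Nat)+1] z) ↑(Finset.univ : Finset (Fin (N+1))) := by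
    intro a _ b _ he
    by_contra hab
    simp only at he
    rcases Nat.lt_or_ge (a:Nat) (b:Nat) with h | h
    · have := hlt ((a:Nat)+1) ((b:Nat)+1) (by omega) (by omega)
      rw [he] at this
      exact absurd this (lt_irrefl _)
    · have h' : (b:Nat) < (a:Nat) := by
        rcases Nat.lt_or_ge (b:Nat) (a:Nat) with h2 | h2
        · exact h2
        · exact absurd (Fin.ext (by omega)) hab
      have := hlt ((b:Nat)+1) ((a:Nat)+1) (by omega) (by omega)
      rw [he] at this
      exact absurd this (lt_irrefl _)
  have hcard := Finset.card_le_card_of_injOn (fun k : Fin (N+1) => g^[(k:Nat)+1] z)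
    (fun a _ => hmem a (by omega)) hinj
  simp at hcard

-- ---------- parent-array function facts ----------

theorem pvIterRange {p : Int → Int} {NI : Int}
    (hcl : ∀ z, 0 ≤ z → z < NI → 0 ≤ p z ∧ p z < NI) :
    ∀ (k : Nat) (z : Int), 0 ≤ z → z < NI → 0 ≤ p^[k] z ∧ p^[k] z < NI := by
  intro k
  induction k with
  | zero => intro z h1 h2; exact ⟨h1, h2⟩
  | succ k ih =>
    intro z h1 h2
    rw [Function.iterate_succ_apply']
    have := ih z h1 h2
    exact hcl _ this.1 this.2

theorem pvPf_b0 (N : Nat) {z : Int} (h1 : 0 ≤ z) (h2 : z < (N:Int)) :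
    pvPf (PySem.List.pyRange 0 (N:Int) 1) z = z := by
  unfold pvPf
  obtain ⟨k, rfl⟩ : ∃ k : Nat, z = (k:Int) := ⟨z.toNat, by omega⟩
  have hk : k < (PySem.List.pyRange 0 (N:Int) 1).length := by
    rw [PySem.List.length_pyRange_one]; omega
  rw [PySem.List.pyGetD_natCast]
  rw [List.getD_eq_getElem _ _ hk]
  rw [PySem.List.getElem_pyRange_one]
  simp

theorem pvPf_update {b : List Int} {rv ru : Int} (z : Int)
    (h1 : 0 ≤ rv) (h2 : rv < (b.length : Int)) (hnn : 0 ≤ z) :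
    pvPf (PySem.List.pySetD b rv ru) z = if z = rv then ru else pvPf b z := by
  unfold pvPf
  obtain ⟨k, rfl⟩ : ∃ k : Nat, rv = (k:Int) := ⟨rv.toNat, by omega⟩
  have hk : k < b.length := by omega
  rw [show PySem.List.pySetD b (k:Int) ru = b.set k ru from PySem.List.pySetD_natCast b k ru]
  by_cases hz : z = (k:Int)
  · subst hz
    rw [if_pos rfl, PySem.List.pyGetD_natCast]
    rw [List.getD_eq_getElem _ _ (by simpa using hk)]
    simp
  · rw [if_neg hz]
    obtain ⟨j, rfl⟩ : ∃ j : Nat, z = (j:Int) := ⟨z.toNat, by omega⟩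
    rw [PySem.List.pyGetD_natCast, PySem.List.pyGetD_natCast]
    have hjk : j ≠ k := by omega
    by_cases hj : j < b.length
    · rw [List.getD_eq_getElem _ _ (by simpa using hj), List.getD_eq_getElem _ _ hj]
      rw [List.getElem_set]
      simp [show ¬ (k = j) by omega]
    · rw [List.getD_eq_default _ _ (by simpa using hj), List.getD_eq_default _ _ (by omega)]

-- pvFindA follows parent pointers: once the chain stabilises within k steps it returns p^[k]
theorem pvFindA_eq (b : List Int) :
    ∀ (k fuel : Nat) (z : Int), pvPf b ((pvPf b)^[k] z) = (pvPf b)^[k] z → k + 1 ≤ fuel →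
      pvFindA b fuel z = (pvPf b)^[k] z := by
  intro k
  induction k with
  | zero =>
    intro fuel z hfix hfl
    obtain ⟨f, rfl⟩ : ∃ f, fuel = f + 1 := ⟨fuel - 1, by omega⟩
    simp only [Function.iterate_zero, id] at hfix ⊢
    unfold pvFindA
    cases hg : PySem.List.pyGet? b z with
    | none => rfl
    | some p =>
      have hp : p = z := by
        have h := hfix
        unfold pvPf PySem.List.pyGetD at h
        rw [hg] at h
        exact h
      simp [hp]
  | succ k ih =>
    intro fuel z hfix hfl
    obtain ⟨f, rfl⟩ : ∃ f, fuel = f + 1 := ⟨fuel - 1, by omega⟩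
    unfold pvFindA
    cases hg : PySem.List.pyGet? b z with
    | none =>
      have hz : pvPf b z = z := by
        unfold pvPf PySem.List.pyGetD
        rw [hg]
        rfl
      rw [Function.iterate_fixed hz]
    | some p =>
      have hp : pvPf b z = p := by
        unfold pvPf PySem.List.pyGetD
        rw [hg]
        rfl
      show (if p = z then z else pvFindA b f p) = (pvPf b)^[k+1] z
      by_cases hpz : p = z
      · have hz : pvPf b z = z := by rw [hp, hpz]
        rw [if_pos hpz, Function.iterate_fixed hz]
      · rw [if_neg hpz]
        have hit : (pvPf b)^[k] p = (pvPf b)^[k+1] z := by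
          rw [Function.iterate_succ_apply, hp]
        rw [ih f p (by rw [hit]; exact hfix) (by omega), hit]

-- ---------- small pvGm facts ----------

theorem pvGm_fix_self (grid : List (List Int)) (m : Nat) : pvGm grid m ((m:Nat):Int) = ((m:Nat):Int) := by
  unfold pvGm
  rw [if_neg]
  intro h
  exact absurd h.2.1 (lt_irrefl _)

theorem pvGm_succ_ne (grid : List (List Int)) (m : Nat) (z : Int) (hz : z ≠ (m:Int)) :
    pvGm grid (m+1) z = pvGm grid m z := by
  unfold pvGm
  by_cases h : 0 ≤ z ∧ z < (m:Int) ∧ pvFm grid z ≠ z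
  · rw [if_pos h, if_pos ⟨h.1, by push_cast; omega, h.2.2⟩]
  · rw [if_neg h, if_neg]
    intro hc
    exact h ⟨hc.1, by have := hc.2.1; push_cast at this; omega, hc.2.2⟩

-- ---------- the chase closed form: processing cell m redirects its class to its successor ----------

theorem pvChaseCF (grid : List (List Int)) (m : Nat) (hm : m < pvNN grid) (z : Int) :
    pvCm grid (m+1) z =
      (if pvCm grid m z = (m:Int) then pvCm grid m (pvFm grid (m:Int)) else pvCm grid m z) := by
  have hstab := pvStabG grid m (le_of_lt hm)
  have hstab' := pvStabG grid (m+1) hm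
  have hCfixm : pvCm grid m (m:Int) = (m:Int) :=
    Function.iterate_fixed (pvGm_fix_self grid m) (pvNN grid)
  have hfixC : ∀ w, pvGm grid m (pvCm grid m w) = pvCm grid m w := by
    intro w
    show pvGm grid m ((pvGm grid m)^[pvNN grid] w) = (pvGm grid m)^[pvNN grid] w
    rw [← Function.iterate_succ_apply' (pvGm grid m) (pvNN grid) w]
    exact (hstab w).symm
  have hlim : ∀ w, pvCm grid m (pvGm grid m w) = pvCm grid m w := by
    intro w
    show (pvGm grid m)^[pvNN grid] (pvGm grid m w) = (pvGm grid m)^[pvNN grid] w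
    rw [← Function.iterate_succ_apply]
    exact (hstab w).symm
  have hlim' : ∀ w, pvCm grid (m+1) (pvGm grid (m+1) w) = pvCm grid (m+1) w := by
    intro w
    show (pvGm grid (m+1))^[pvNN grid] (pvGm grid (m+1) w) = (pvGm grid (m+1))^[pvNN grid] w
    rw [← Function.iterate_succ_apply]
    exact (hstab' w).symm
  by_cases hfm : pvFm grid (m:Int) = (m:Int)
  · have hGG : pvGm grid (m+1) = pvGm grid m := by
      funext w
      by_cases hw : w = (m:Int)
      · subst hw
        rw [pvGm_fix_self grid m]
        unfold pvGm
        rw [if_neg]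
        intro h
        exact h.2.2 hfm
      · exact pvGm_succ_ne grid m w hw
    have hCC : pvCm grid (m+1) z = pvCm grid m z := by
      show (pvGm grid (m+1))^[pvNN grid] z = (pvGm grid m)^[pvNN grid] z
      rw [hGG]
    rw [hCC]
    by_cases hc : pvCm grid m z = (m:Int)
    · rw [if_pos hc, hfm, hCfixm, hc]
    · rw [if_neg hc]
  · have hhtm : pvHt grid (pvFm grid (m:Int)) < pvHt grid ((m:Int)) := pvHt_fm_lt grid hfm
    have havoid : ∀ (k : Nat) (w : Int), pvHt grid w < pvHt grid ((m:Int)) →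
        (pvGm grid (m+1))^[k] w = (pvGm grid m)^[k] w := by
      intro k
      induction k with
      | zero => intro w _; rfl
      | succ k ih =>
        intro w hw
        have hwm : w ≠ (m:Int) := fun h => absurd (h ▸ hw) (lt_irrefl _)
        rw [Function.iterate_succ_apply, Function.iterate_succ_apply,
          pvGm_succ_ne grid m w hwm]
        exact ih _ (lt_of_le_of_lt (pvHt_gm_le grid m w) hw)
    have hG'm : pvGm grid (m+1) (m:Int) = pvFm grid (m:Int) := by
      unfold pvGm
      rw [if_pos ⟨by positivity, by push_cast; omega, hfm⟩]
    have hfixcase : ∀ w, pvGm grid m w = w →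
        pvCm grid (m+1) w =
          (if pvCm grid m w = (m:Int) then pvCm grid m (pvFm grid (m:Int)) else pvCm grid m w) := by
      intro w hw
      have hCw : pvCm grid m w = w := Function.iterate_fixed hw (pvNN grid)
      by_cases hwm : w = (m:Int)
      · subst hwm
        rw [hCw, if_pos rfl]
        have h1 : pvCm grid (m+1) ((m:Int)) = pvCm grid (m+1) (pvFm grid (m:Int)) := by
          rw [← hlim' ((m:Int)), hG'm]
        rw [h1]
        show (pvGm grid (m+1))^[pvNN grid] _ = (pvGm grid m)^[pvNN grid] _
        exact havoid (pvNN grid) _ hhtm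
      · have hG'w : pvGm grid (m+1) w = w := by
          rw [pvGm_succ_ne grid m w hwm, hw]
        have : pvCm grid (m+1) w = w := Function.iterate_fixed hG'w (pvNN grid)
        rw [this, hCw, if_neg hwm]
    have key : ∀ (k : Nat) (w : Int), (pvGm grid m)^[k] w = pvCm grid m w →
        pvCm grid (m+1) w =
          (if pvCm grid m w = (m:Int) then pvCm grid m (pvFm grid (m:Int)) else pvCm grid m w) := by
      intro k
      induction k with
      | zero =>
        intro w hw
        simp only [Function.iterate_zero, id] at hw
        have hfix : pvGm grid m w = w := by
          conv_lhs => rw [hw]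
          rw [hfixC w, ← hw]
        exact hfixcase w hfix
      | succ k ih =>
        intro w hw
        by_cases hfix : pvGm grid m w = w
        · exact hfixcase w hfix
        · have hwm : w ≠ (m:Int) := fun h => hfix (h ▸ pvGm_fix_self grid m)
          have hCgw : pvCm grid m (pvGm grid m w) = pvCm grid m w := hlim w
          have hpre : (pvGm grid m)^[k] (pvGm grid m w) = pvCm grid m (pvGm grid m w) := by
            rw [hCgw, ← hw, ← Function.iterate_succ_apply]
          have hih := ih (pvGm grid m w) hpre
          calc pvCm grid (m+1) w = pvCm grid (m+1) (pvGm grid (m+1) w) := (hlim' w).symm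
            _ = pvCm grid (m+1) (pvGm grid m w) := by rw [pvGm_succ_ne grid m w hwm]
            _ = _ := by rw [hih, hCgw]
    exact key (pvNN grid) z rfl

-- ---------- A's union step preserves the invariant ----------

theorem pvUnion_inv (grid : List (List Int)) (m : Nat) (b : List Int)
    (hm : m < pvNN grid) (hInv : pvInv grid m b) :
    pvInv grid (m+1) (pvUnionStep b ((m:Nat):Int) (pvFm grid ((m:Nat):Int))) := by
  obtain ⟨hlen, hcl, hst, hker⟩ := hInv
  have hroot_fix : ∀ z, 0 ≤ z → z < (pvNN grid : Int) →
      pvPf b ((pvPf b)^[pvNN grid] z) = (pvPf b)^[pvNN grid] z := by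
    intro z h1 h2
    have h3 := pvAbsorb (hst z h1 h2) (le_of_lt hm)
    have h4 := pvAbsorb (hst z h1 h2) (show m ≤ pvNN grid + 1 by omega)
    rw [← Function.iterate_succ_apply' (pvPf b) (pvNN grid) z, h3, h4]
  have hroot_range : ∀ z, 0 ≤ z → z < (pvNN grid : Int) →
      0 ≤ (pvPf b)^[pvNN grid] z ∧ (pvPf b)^[pvNN grid] z < (pvNN grid : Int) :=
    fun z h1 h2 => pvIterRange hcl (pvNN grid) z h1 h2
  have hroot_m : ∀ z, 0 ≤ z → z < (pvNN grid : Int) →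
      (pvPf b)^[m] z = (pvPf b)^[pvNN grid] z := by
    intro z h1 h2
    exact (pvAbsorb (hst z h1 h2) (le_of_lt hm)).symm
  have hu : 0 ≤ ((m:Nat):Int) ∧ ((m:Nat):Int) < (pvNN grid : Int) := by
    constructor
    · positivity
    · exact_mod_cast hm
  have hv := pvFm_range grid hu.1 hu.2
  have hruR := hroot_range _ hu.1 hu.2
  have hrvR := hroot_range _ hv.1 hv.2
  have hrufix : pvPf b ((pvPf b)^[pvNN grid] ((m:Nat):Int)) = (pvPf b)^[pvNN grid] ((m:Nat):Int) :=
    hroot_fix _ hu.1 hu.2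
  have hrvfix : pvPf b ((pvPf b)^[pvNN grid] (pvFm grid ((m:Nat):Int))) =
      (pvPf b)^[pvNN grid] (pvFm grid ((m:Nat):Int)) := hroot_fix _ hv.1 hv.2
  have hfind : ∀ z, 0 ≤ z → z < (pvNN grid : Int) →
      pvFindA b (b.length+1) z = (pvPf b)^[pvNN grid] z := by
    intro z h1 h2
    exact pvFindA_eq b (pvNN grid) (b.length+1) z (hroot_fix z h1 h2) (by omega)
  set ru := (pvPf b)^[pvNN grid] ((m:Nat):Int) with hru_def
  set rv := (pvPf b)^[pvNN grid] (pvFm grid ((m:Nat):Int)) with hrv_def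
  have hstep : pvUnionStep b ((m:Nat):Int) (pvFm grid ((m:Nat):Int)) = PySem.List.pySetD b rv ru := by
    unfold pvUnionStep
    rw [hfind _ hv.1 hv.2, hfind _ hu.1 hu.2]
  rw [hstep]
  set b' := PySem.List.pySetD b rv ru with hb'
  have hlen' : b'.length = pvNN grid := by
    rw [hb', PySem.List.length_pySetD, hlen]
  have hup : ∀ z, 0 ≤ z → pvPf b' z = if z = rv then ru else pvPf b z := by
    intro z hz
    exact pvPf_update z hrvR.1 (by rw [hlen]; exact hrvR.2) hz
  have hcl' : ∀ z, 0 ≤ z → z < (pvNN grid : Int) →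
      0 ≤ pvPf b' z ∧ pvPf b' z < (pvNN grid : Int) := by
    intro z h1 h2
    rw [hup z h1]
    split_ifs
    · exact hruR
    · exact hcl z h1 h2
  have hp'ru : pvPf b' ru = ru := by
    rw [hup _ hruR.1]
    split_ifs with h
    · rfl
    · exact hrufix
  have hCFfix : ∀ z, 0 ≤ z → z < (pvNN grid : Int) →
      pvPf b' (if (pvPf b)^[pvNN grid] z = rv then ru else (pvPf b)^[pvNN grid] z) =
        (if (pvPf b)^[pvNN grid] z = rv then ru else (pvPf b)^[pvNN grid] z) := by
    intro z h1 h2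
    by_cases hc : (pvPf b)^[pvNN grid] z = rv
    · rw [if_pos hc]
      exact hp'ru
    · rw [if_neg hc, hup _ (hroot_range z h1 h2).1, if_neg hc]
      exact hroot_fix z h1 h2
  have key : ∀ (k : Nat) (z : Int), 0 ≤ z → z < (pvNN grid : Int) →
      (pvPf b)^[k] z = (pvPf b)^[pvNN grid] z →
      (pvPf b')^[k+1] z = (if (pvPf b)^[pvNN grid] z = rv then ru else (pvPf b)^[pvNN grid] z) := by
    intro k
    induction k with
    | zero =>
      intro z h1 h2 hz
      simp only [Function.iterate_zero, id] at hz
      by_cases hzr : z = rv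
      · have : pvPf b' z = ru := by rw [hup z h1, if_pos hzr]
        rw [Function.iterate_one, this, ← hz, if_pos hzr]
      · have hpz : pvPf b z = z := by
          conv_lhs => rw [hz]
          rw [hroot_fix z h1 h2, ← hz]
        have : pvPf b' z = z := by rw [hup z h1, if_neg hzr, hpz]
        rw [Function.iterate_one, this, ← hz, if_neg hzr]
    | succ k ih =>
      intro z h1 h2 hz
      by_cases hfx : pvPf b z = z
      · have hRz : (pvPf b)^[pvNN grid] z = z := Function.iterate_fixed hfx (pvNN grid)
        by_cases hzr : z = rv
        · have hz1 : pvPf b' z = ru := by rw [hup z h1, if_pos hzr]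
          rw [Function.iterate_succ_apply, hz1, Function.iterate_fixed hp'ru, hRz, if_pos hzr]
        · have hz1 : pvPf b' z = z := by rw [hup z h1, if_neg hzr, hfx]
          rw [Function.iterate_fixed hz1, hRz, if_neg hzr]
      · have hzrv : z ≠ rv := by
          intro h
          rw [h] at hfx
          exact hfx hrvfix
        have hpzR := hcl z h1 h2
        have hRpz : (pvPf b)^[pvNN grid] (pvPf b z) = (pvPf b)^[pvNN grid] z := by
          rw [← Function.iterate_succ_apply (pvPf b) (pvNN grid) z]
          have e1 := pvAbsorb (hst z h1 h2) (show m ≤ pvNN grid + 1 by omega)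
          have e2 := pvAbsorb (hst z h1 h2) (le_of_lt hm)
          rw [e1, ← e2]
        have hpre : (pvPf b)^[k] (pvPf b z) = (pvPf b)^[pvNN grid] (pvPf b z) := by
          rw [hRpz, ← hz, ← Function.iterate_succ_apply]
        have hih := ih (pvPf b z) hpzR.1 hpzR.2 hpre
        have hz1 : pvPf b' z = pvPf b z := by rw [hup z h1, if_neg hzrv]
        rw [Function.iterate_succ_apply, hz1, hih, hRpz]
  have hCF : ∀ z, 0 ≤ z → z < (pvNN grid : Int) → ∀ j, m+1 ≤ j →
      (pvPf b')^[j] z = (if (pvPf b)^[pvNN grid] z = rv then ru else (pvPf b)^[pvNN grid] z) := by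
    intro z h1 h2 j hj
    have hbase := key m z h1 h2 (hroot_m z h1 h2)
    obtain ⟨t, rfl⟩ : ∃ t, j = (m+1) + t := ⟨j - (m+1), by omega⟩
    induction t with
    | zero => exact hbase
    | succ t iht =>
      have he : (m+1) + (t+1) = ((m+1)+t)+1 := by omega
      rw [he, Function.iterate_succ_apply', iht (by omega)]
      exact hCFfix z h1 h2
  refine ⟨hlen', hcl', ?_, ?_⟩
  · intro z h1 h2
    rw [hCF z h1 h2 (m+1) le_rfl, hCF z h1 h2 (m+2) (by omega)]
  · have hRoot' : ∀ z, 0 ≤ z → z < (pvNN grid : Int) →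
        pvRootm grid b' z = (if pvRootm grid b z = rv then ru else pvRootm grid b z) := by
      intro z h1 h2
      exact hCF z h1 h2 (pvNN grid) (by omega)
    intro x y hx1 hx2 hy1 hy2
    rw [hRoot' x hx1 hx2, hRoot' y hy1 hy2, pvChaseCF grid m hm x, pvChaseCF grid m hm y]
    have hCmm : pvCm grid m ((m:Nat):Int) = ((m:Nat):Int) :=
      Function.iterate_fixed (pvGm_fix_self grid m) (pvNN grid)
    have hbr1 : ∀ w, 0 ≤ w → w < (pvNN grid : Int) →
        (pvRootm grid b w = rv ↔ pvCm grid m w = pvCm grid m (pvFm grid ((m:Nat):Int))) := by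
      intro w h1 h2
      exact hker w _ h1 h2 hv.1 hv.2
    have hbr2 : ∀ w, 0 ≤ w → w < (pvNN grid : Int) →
        (pvRootm grid b w = ru ↔ pvCm grid m w = ((m:Nat):Int)) := by
      intro w h1 h2
      have := hker w _ h1 h2 hu.1 hu.2
      rw [hCmm] at this
      exact this
    by_cases hfm : pvFm grid ((m:Nat):Int) = ((m:Nat):Int)
    · -- the processed edge is a self-loop: both sides are unchanged
      have hrveq : rv = ru := by rw [hrv_def, hru_def, hfm]
      have hCfm : pvCm grid m (pvFm grid ((m:Nat):Int)) = ((m:Nat):Int) := by rw [hfm, hCmm]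
      have hL : ∀ w, (if w = rv then ru else w) = w := by
        intro w
        split_ifs with h
        · rw [h, hrveq]
        · rfl
      have hR : ∀ w, (if w = ((m:Nat):Int) then pvCm grid m (pvFm grid ((m:Nat):Int)) else w) = w := by
        intro w
        split_ifs with h
        · rw [hCfm, h]
        · rfl
      rw [hL (pvRootm grid b x), hL (pvRootm grid b y), hR (pvCm grid m x), hR (pvCm grid m y)]
      exact hker x y hx1 hx2 hy1 hy2
    · have hCv_ne : pvCm grid m (pvFm grid ((m:Nat):Int)) ≠ ((m:Nat):Int) := by
        intro h
        have h1 : pvHt grid (pvCm grid m (pvFm grid ((m:Nat):Int))) ≤ pvHt grid (pvFm grid ((m:Nat):Int)) :=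
          pvHt_gm_iter_le grid m (pvNN grid) _
        have h2 := pvHt_fm_lt grid hfm
        rw [h] at h1
        exact absurd (lt_of_le_of_lt h1 h2) (lt_irrefl _)
      have hrurv : ru ≠ rv := by
        intro h
        have h1 : pvRootm grid b ((m:Nat):Int) = pvRootm grid b (pvFm grid ((m:Nat):Int)) := h
        have h2 := (hker _ _ hu.1 hu.2 hv.1 hv.2).1 h1
        rw [hCmm] at h2
        exact hCv_ne h2.symm
      by_cases hcx : pvCm grid m x = ((m:Nat):Int) <;> by_cases hcy : pvCm grid m y = ((m:Nat):Int)
      · have hrx : pvRootm grid b x = ru := (hbr2 x hx1 hx2).2 hcx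
        have hry : pvRootm grid b y = ru := (hbr2 y hy1 hy2).2 hcy
        rw [if_pos hcx, if_pos hcy, if_neg (by rw [hrx]; exact hrurv),
          if_neg (by rw [hry]; exact hrurv), hrx, hry]
        simp
      · have hrx : pvRootm grid b x = ru := (hbr2 x hx1 hx2).2 hcx
        rw [if_pos hcx, if_neg hcy, if_neg (by rw [hrx]; exact hrurv), hrx]
        by_cases hyr : pvRootm grid b y = rv
        · rw [if_pos hyr]
          have h2 : pvCm grid m y = pvCm grid m (pvFm grid ((m:Nat):Int)) := (hbr1 y hy1 hy2).1 hyr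
          constructor
          · intro _
            exact h2.symm
          · intro _
            rfl
        · rw [if_neg hyr]
          constructor
          · intro h
            exact absurd ((hbr2 y hy1 hy2).1 h.symm) hcy
          · intro h
            exact absurd ((hbr1 y hy1 hy2).2 h.symm) hyr
      · have hry : pvRootm grid b y = ru := (hbr2 y hy1 hy2).2 hcy
        rw [if_neg hcx, if_pos hcy]
        by_cases hxr : pvRootm grid b x = rv
        · rw [if_pos hxr, if_neg (by rw [hry]; exact hrurv), hry]
          have h2 : pvCm grid m x = pvCm grid m (pvFm grid ((m:Nat):Int)) := (hbr1 x hx1 hx2).1 hxr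
          constructor
          · intro _
            exact h2
          · intro _
            rfl
        · rw [if_neg hxr, if_neg (by rw [hry]; exact hrurv), hry]
          constructor
          · intro h
            exact absurd ((hbr2 x hx1 hx2).1 h) hcx
          · intro h
            exact absurd ((hbr1 x hx1 hx2).2 h) hxr
      · rw [if_neg hcx, if_neg hcy]
        by_cases hxr : pvRootm grid b x = rv <;> by_cases hyr : pvRootm grid b y = rv
        · rw [if_pos hxr, if_pos hyr]
          have h2 := (hbr1 x hx1 hx2).1 hxr
          have h3 := (hbr1 y hy1 hy2).1 hyr
          constructor
          · intro _
            rw [h2, h3]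
          · intro _
            rfl
        · rw [if_pos hxr, if_neg hyr]
          constructor
          · intro h
            exact absurd ((hbr2 y hy1 hy2).1 h.symm) hcy
          · intro h
            have h2 := (hbr1 x hx1 hx2).1 hxr
            exact absurd ((hbr1 y hy1 hy2).2 (h.symm.trans h2)) hyr
        · rw [if_neg hxr, if_pos hyr]
          constructor
          · intro h
            exact absurd ((hbr2 x hx1 hx2).1 h) hcx
          · intro h
            have h3 := (hbr1 y hy1 hy2).1 hyr
            exact absurd ((hbr1 x hx1 hx2).2 (h.trans h3)) hxr
        · rw [if_neg hxr, if_neg hyr]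
          exact hker x y hx1 hx2 hy1 hy2

-- ---------- B's neighbour-min step equals A's get_min ----------

theorem pvMinGo {α κ : Type} [LT κ] [DecidableLT κ] (key : α → κ) :
    ∀ (t : List α) (m : α),
      List.foldl (fun acc x => match acc with
        | none => some x
        | some m => if key x < key m then some x else some m) (some m) t
        = some (t.foldl (fun m x => if key x < key m then x else m) m) := by
  intro t
  induction t with
  | nil => intro m; rfl
  | cons x t ih =>
    intro m
    rw [List.foldl_cons, List.foldl_cons]
    show List.foldl _ (if key x < key m then some x else some m) t = _
    by_cases h : key x < key m
    · rw [if_pos h, if_pos h, ih]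
    · rw [if_neg h, if_neg h, ih]

theorem pvMinDCons {α κ : Type} [LT κ] [DecidableLT κ] (key : α → κ) (x : α) (t : List α) (d : α) :
    PySem.List.minD (x :: t) key d = t.foldl (fun m y => if key y < key m then y else m) x := by
  have h := pvMinGo key t x
  calc PySem.List.minD (x :: t) key d
      = (List.foldl (fun acc x => match acc with
          | none => some x
          | some m => if key x < key m then some x else some m) (some x) t).getD d := rfl
    _ = _ := by rw [h]; rfl

set_option maxHeartbeats 2000000 in
theorem pvLowest_eq (grid : List (List Int)) (i j n : Int) :
    pvLowest grid i j n = pvGetMin grid i j n := by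
  unfold pvLowest pvGetMin
  by_cases h1 : i > 0 <;> by_cases h2 : i < n-1 <;> by_cases h3 : j > 0 <;> by_cases h4 : j < n-1 <;>
    simp only [h1, h2, h3, h4, if_true, if_false, List.append_nil, List.nil_append, List.cons_append,
      pvMinDCons, List.foldl_cons, List.foldl_nil, true_and, false_and, List.cons_ne_nil] <;>
    split_ifs <;> first | rfl | (exfalso; simp_all <;> omega)

-- ---------- stabilisation of the plain successor map ----------

theorem pvFm_stab (grid : List (List Int)) (z : Int) :
    pvFm grid ((pvFm grid)^[pvNN grid] z) = (pvFm grid)^[pvNN grid] z := by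
  have h := pvStabG grid (pvNN grid) le_rfl z
  rw [pvGm_eq_fm] at h
  rw [← Function.iterate_succ_apply' (pvFm grid) (pvNN grid) z]
  exact h.symm

-- ---------- B's chase walk computes the stabilised successor ----------

theorem pvChase_eq (grid : List (List Int)) :
    ∀ (k fuel : Nat) (c : Int × Int),
      0 ≤ c.1 → c.1 < (grid.length:Int) → 0 ≤ c.2 → c.2 < (grid.length:Int) →
      pvFm grid ((pvFm grid)^[k] (pvEncK grid.length c)) = (pvFm grid)^[k] (pvEncK grid.length c) →
      k + 1 ≤ fuel →
      pvChase grid (grid.length:Int) fuel c = pvDecK grid.length ((pvFm grid)^[k] (pvEncK grid.length c)) := by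
  intro k
  induction k with
  | zero =>
    intro fuel c h1 h2 h3 h4 hfix hfl
    obtain ⟨f, rfl⟩ : ∃ f, fuel = f + 1 := ⟨fuel - 1, by omega⟩
    simp only [Function.iterate_zero, id] at hfix ⊢
    have hEr := pvEnc_range (n := grid.length) h1 h2 h3 h4
    have hfc : pvFm grid (pvEncK grid.length c) =
        pvEncK grid.length (pvGetMin grid c.1 c.2 (grid.length:Int)) := by
      unfold pvFm
      rw [if_pos ⟨hEr.1, by exact_mod_cast hEr.2⟩, pvDec_enc h1 h2 h3 h4]
    have hmc : pvGetMin grid c.1 c.2 (grid.length:Int) = c := by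
      have hgv := pvGetMin_valid grid (n := grid.length) h1 h2 h3 h4
      have := hfix
      rw [hfc] at this
      have hdd := congrArg (pvDecK grid.length) this
      rw [pvDec_enc hgv.1 hgv.2.1 hgv.2.2.1 hgv.2.2.2, pvDec_enc h1 h2 h3 h4] at hdd
      exact hdd
    unfold pvChase
    rw [pvLowest_eq, hmc, if_pos rfl, pvDec_enc h1 h2 h3 h4]
  | succ k ih =>
    intro fuel c h1 h2 h3 h4 hfix hfl
    obtain ⟨f, rfl⟩ : ∃ f, fuel = f + 1 := ⟨fuel - 1, by omega⟩
    have hEr := pvEnc_range (n := grid.length) h1 h2 h3 h4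
    have hfc : pvFm grid (pvEncK grid.length c) =
        pvEncK grid.length (pvGetMin grid c.1 c.2 (grid.length:Int)) := by
      unfold pvFm
      rw [if_pos ⟨hEr.1, by exact_mod_cast hEr.2⟩, pvDec_enc h1 h2 h3 h4]
    have hgv := pvGetMin_valid grid (n := grid.length) h1 h2 h3 h4
    unfold pvChase
    rw [pvLowest_eq]
    by_cases hmc : pvGetMin grid c.1 c.2 (grid.length:Int) = c
    · rw [if_pos hmc]
      have hself : pvFm grid (pvEncK grid.length c) = pvEncK grid.length c := by
        rw [hfc, hmc]
      rw [Function.iterate_fixed hself, pvDec_enc h1 h2 h3 h4]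
    · rw [if_neg hmc]
      have hstep : pvEncK grid.length (pvGetMin grid c.1 c.2 (grid.length:Int)) =
          pvFm grid (pvEncK grid.length c) := hfc.symm
      have hiter : ∀ (t : Nat), (pvFm grid)^[t] (pvEncK grid.length (pvGetMin grid c.1 c.2 (grid.length:Int))) =
          (pvFm grid)^[t+1] (pvEncK grid.length c) := by
        intro t
        rw [hstep, ← Function.iterate_succ_apply]
      have := ih f (pvGetMin grid c.1 c.2 (grid.length:Int)) hgv.1 hgv.2.1 hgv.2.2.1 hgv.2.2.2
        (by rw [hiter k]; exact hfix) (by omega)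
      rw [this, hiter k]

-- ---------- flattening the nested loops ----------

theorem pvNestedFold {α : Type} (L M : List Int) (step : α → (Int × Int) → α) (init : α) :
    L.foldl (fun acc i => M.foldl (fun acc j => step acc (i, j)) acc) init
      = (L.flatMap (fun i => M.map (fun j => (i, j)))).foldl step init := by
  induction L generalizing init with
  | nil => rfl
  | cons x L ih =>
    rw [List.flatMap_cons, List.foldl_append, List.foldl_cons, List.foldl_map, ih]

theorem pvRangeShift (c : Int) (n : Nat) :
    (PySem.List.pyRange 0 (n:Int) 1).map (fun j => c + j) = PySem.List.pyRange c (c + (n:Int)) 1 := by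
  rw [PySem.List.pyRange_one, PySem.List.pyRange_one, List.map_map]
  simp

theorem pvPairsEnc (n : Nat) : ∀ (a : Nat),
    ((PySem.List.pyRange 0 (a:Int) 1).flatMap (fun i => (PySem.List.pyRange 0 (n:Int) 1).map (fun j => (i, j)))).map
        (fun c : Int × Int => c.1 * (n:Int) + c.2)
      = PySem.List.pyRange 0 ((a:Int) * (n:Int)) 1 := by
  intro a
  induction a with
  | zero =>
    have e0 : PySem.List.pyRange 0 ((0:Nat):Int) 1 = [] := PySem.List.pyRange_one_eq_nil (by norm_num)
    have e1 : PySem.List.pyRange 0 (((0:Nat):Int) * (n:Int)) 1 = [] := PySem.List.pyRange_one_eq_nil (by simp)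
    rw [e0, e1]
    rfl
  | succ a ih =>
    have h1 : ((a+1 : Nat) : Int) = (a:Int) + 1 := by push_cast; ring
    rw [h1, PySem.List.pyRange_one_succ_right (by positivity), List.flatMap_append, List.map_append, ih]
    have h2 : ([(a:Int)].flatMap (fun i => (PySem.List.pyRange 0 (n:Int) 1).map (fun j => (i, j)))).map
        (fun c : Int × Int => c.1 * (n:Int) + c.2) = PySem.List.pyRange ((a:Int) * (n:Int)) ((a:Int) * (n:Int) + (n:Int)) 1 := by
      rw [List.flatMap_singleton, List.map_map, ← pvRangeShift ((a:Int) * (n:Int)) n]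
      congr 1
    rw [h2, show ((a:Int)+1) * (n:Int) = (a:Int) * (n:Int) + (n:Int) by ring,
      ← PySem.List.pyRange_one_append 0 ((a:Int) * (n:Int)) ((a:Int) * (n:Int) + (n:Int))
      (by positivity) (by have := Int.natCast_nonneg n; linarith)]

-- ---------- the union loop establishes the invariant ----------

theorem pvLoopInv (grid : List (List Int)) : ∀ (m : Nat), m ≤ pvNN grid →
    pvInv grid m ((PySem.List.pyRange 0 ((m:Nat):Int) 1).foldl
      (fun b z => pvUnionStep b z (pvFm grid z))
      (PySem.List.pyRange 0 ((pvNN grid : Nat):Int) 1)) := by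
  intro m
  induction m with
  | zero =>
    intro _
    have e0 : PySem.List.pyRange 0 ((0:Nat):Int) 1 = [] := PySem.List.pyRange_one_eq_nil (by norm_num)
    rw [e0]
    simp only [List.foldl_nil]
    have hb0 : ∀ z, 0 ≤ z → z < (pvNN grid : Int) →
        pvPf (PySem.List.pyRange 0 ((pvNN grid : Nat):Int) 1) z = z := by
      intro z h1 h2
      exact pvPf_b0 (pvNN grid) h1 h2
    refine ⟨?_, ?_, ?_, ?_⟩
    · rw [PySem.List.length_pyRange_one]
      omega
    · intro z h1 h2
      rw [hb0 z h1 h2]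
      exact ⟨h1, h2⟩
    · intro z h1 h2
      simp only [Function.iterate_zero, id]
      exact (hb0 z h1 h2).symm
    · intro x y hx1 hx2 hy1 hy2
      have hG0 : ∀ w, pvGm grid 0 w = w := by
        intro w
        unfold pvGm
        rw [if_neg]
        intro h
        have := h.2.1
        omega
      have hRx : pvRootm grid _ x = x := Function.iterate_fixed (hb0 x hx1 hx2) (pvNN grid)
      have hRy : pvRootm grid _ y = y := Function.iterate_fixed (hb0 y hy1 hy2) (pvNN grid)
      have hCx : pvCm grid 0 x = x := Function.iterate_fixed (hG0 x) (pvNN grid)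
      have hCy : pvCm grid 0 y = y := Function.iterate_fixed (hG0 y) (pvNN grid)
      rw [hRx, hRy, hCx, hCy]
  | succ m ih =>
    intro hm
    have h1 : ((m+1 : Nat) : Int) = (m:Int) + 1 := by push_cast; ring
    rw [h1, PySem.List.pyRange_one_succ_right (by positivity), List.foldl_append, List.foldl_cons,
      List.foldl_nil]
    exact pvUnion_inv grid m _ (by omega) (ih (by omega))


theorem pvCountMap {κ κ' : Type} [BEq κ] [LawfulBEq κ] [BEq κ'] [LawfulBEq κ'] (g : κ → κ') :
    ∀ (l : List κ) (k : κ), (∀ x ∈ l, g x = g k → x = k) →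
      List.count (g k) (l.map g) = List.count k l := by
  intro l
  induction l with
  | nil => intro k _; rfl
  | cons x t ih =>
    intro k hinj
    rw [List.map_cons, List.count_cons, List.count_cons, ih k (fun y hy => hinj y (List.mem_cons_of_mem x hy))]
    congr 1
    by_cases h : x = k
    · subst h; simp
    · have : ¬ (g x = g k) := fun he => h (hinj x (List.mem_cons_self) he)
      simp [h, this]

theorem pvSetMapFold {κ κ' : Type} [BEq κ] [LawfulBEq κ] [BEq κ'] [LawfulBEq κ'] (g : κ → κ') :
    ∀ (l : List κ) (s : List κ),
      (∀ x y, (x ∈ s ∨ x ∈ l) → (y ∈ s ∨ y ∈ l) → g x = g y → x = y) →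
      List.foldl PySem.Set.add (s.map g) (l.map g) = (List.foldl PySem.Set.add s l).map g := by
  intro l
  induction l with
  | nil => intro s _; rfl
  | cons x t ih =>
    intro s hinj
    rw [List.map_cons, List.foldl_cons, List.foldl_cons]
    have hcont : PySem.Set.contains (s.map g) (g x) = PySem.Set.contains s x := by
      unfold PySem.Set.contains
      by_cases h : x ∈ s
      · simp [h, List.mem_map_of_mem (f := g) h]
      · have h2 : g x ∉ s.map g := by
          intro hm
          obtain ⟨y, hy, hyx⟩ := List.mem_map.1 hm
          exact h ((hinj y x (Or.inl hy) (Or.inr List.mem_cons_self) hyx) ▸ hy)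
        simp [h, h2]
    have hadd : PySem.Set.add (s.map g) (g x) = (PySem.Set.add s x).map g := by
      unfold PySem.Set.add
      rw [hcont]
      by_cases h : PySem.Set.contains s x = true
      · rw [if_pos h, if_pos h]
      · rw [if_neg h, if_neg h]
        rw [List.map_append]
        rfl
    rw [hadd]
    rw [ih (PySem.Set.add s x) ?hs]
    intro a b ha hb
    apply hinj a b
    · rcases ha with h | h
      · unfold PySem.Set.add at h
        split_ifs at h
        · exact Or.inl h
        · rcases List.mem_append.1 h with h | h
          · exact Or.inl h
          · simp at h; subst h; exact Or.inr List.mem_cons_self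
      · exact Or.inr (List.mem_cons_of_mem x h)
    · rcases hb with h | h
      · unfold PySem.Set.add at h
        split_ifs at h
        · exact Or.inl h
        · rcases List.mem_append.1 h with h | h
          · exact Or.inl h
          · simp at h; subst h; exact Or.inr List.mem_cons_self
      · exact Or.inr (List.mem_cons_of_mem x h)

theorem pvSetMapOfList {κ κ' : Type} [BEq κ] [LawfulBEq κ] [BEq κ'] [LawfulBEq κ'] (g : κ → κ')
    (l : List κ) (hinj : ∀ x ∈ l, ∀ y ∈ l, g x = g y → x = y) :
    PySem.Set.ofList (l.map g) = (PySem.Set.ofList l).map g := by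
  unfold PySem.Set.ofList
  have := pvSetMapFold g l [] (by
    intro x y hx hy
    apply hinj
    · rcases hx with h | h
      · simp at h
      · exact h
    · rcases hy with h | h
      · simp at h
      · exact h)
  simpa [PySem.Set.empty] using this

theorem pvCounterValuesMap {κ κ' : Type} [BEq κ] [LawfulBEq κ] [BEq κ'] [LawfulBEq κ'] (g : κ → κ')
    (l : List κ) (hinj : ∀ x ∈ l, ∀ y ∈ l, g x = g y → x = y) :
    (PySem.Dict.counter (l.map g)).values = (PySem.Dict.counter l).values := by
  have hv : ∀ (d : PySem.Dict κ' Int), d.values = d.items.map (·.2) := fun _ => rfl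
  have hv2 : ∀ (d : PySem.Dict κ Int), d.values = d.items.map (·.2) := fun _ => rfl
  rw [hv, hv2, PySem.Dict.items_counter, PySem.Dict.items_counter, List.map_map, List.map_map,
    pvSetMapOfList g l hinj, List.map_map]
  apply List.map_congr_left
  intro k hk
  have hkl : k ∈ l := (PySem.Set.mem_ofList l k).1 hk
  simp only [Function.comp]
  rw [pvCountMap g l k (fun x hx he => hinj x hx k hkl he)]

-- ---------- membership and encoding small facts ----------

theorem pvMemP (n : Nat) {c : Int × Int}
    (hc : c ∈ (PySem.List.pyRange 0 (n:Int) 1).flatMap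
      (fun i => (PySem.List.pyRange 0 (n:Int) 1).map (fun j => (i, j)))) :
    0 ≤ c.1 ∧ c.1 < (n:Int) ∧ 0 ≤ c.2 ∧ c.2 < (n:Int) := by
  rw [List.mem_flatMap] at hc
  obtain ⟨i, hi, hc⟩ := hc
  rw [List.mem_map] at hc
  obtain ⟨j, hj, rfl⟩ := hc
  rw [PySem.List.mem_pyRange_one] at hi hj
  exact ⟨hi.1, hi.2, hj.1, hj.2⟩

theorem pvFm_enc (grid : List (List Int)) {c : Int × Int}
    (h1 : 0 ≤ c.1) (h2 : c.1 < (grid.length:Int)) (h3 : 0 ≤ c.2) (h4 : c.2 < (grid.length:Int)) :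
    pvFm grid (pvEncK grid.length c) = pvEncK grid.length (pvGetMin grid c.1 c.2 (grid.length:Int)) := by
  have hEr := pvEnc_range (n := grid.length) h1 h2 h3 h4
  unfold pvFm
  rw [if_pos ⟨hEr.1, by exact_mod_cast hEr.2⟩, pvDec_enc h1 h2 h3 h4]

-- ---------- reduction of port A to canonical form ----------

def pvBN (grid : List (List Int)) : List Int :=
  (PySem.List.pyRange 0 ((pvNN grid:Nat):Int) 1).foldl (fun b z => pvUnionStep b z (pvFm grid z))
    (PySem.List.pyRange 0 ((pvNN grid:Nat):Int) 1)

theorem pvAside (grid : List (List Int)) :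
    calculateBasins grid = PySem.List.sorted
      (PySem.Dict.counter ((PySem.List.pyRange 0 ((pvNN grid:Nat):Int) 1).map
        (fun u => pvRootm grid (pvBN grid) u))).values (fun x => x) true := by
  have hmul : (grid.length:Int) * (grid.length:Int) = ((pvNN grid:Nat):Int) := by
    unfold pvNN; push_cast; ring
  have hsq : (grid.length:Int)^2 = ((pvNN grid:Nat):Int) := by
    rw [← hmul]; ring
  obtain ⟨hlen, hcl, hst, hker⟩ := pvLoopInv grid (pvNN grid) le_rfl
  have hb : (PySem.List.pyRange 0 (grid.length:Int) 1).foldl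
      (fun b i => (PySem.List.pyRange 0 (grid.length:Int) 1).foldl
        (fun b j => pvUnionStep b (i * (grid.length:Int) + j)
          ((pvGetMin grid i j (grid.length:Int)).1 * (grid.length:Int) +
            (pvGetMin grid i j (grid.length:Int)).2)) b)
      (PySem.List.pyRange 0 ((grid.length:Int)^2) 1) = pvBN grid := by
    have HN := pvNestedFold (PySem.List.pyRange 0 (grid.length:Int) 1)
      (PySem.List.pyRange 0 (grid.length:Int) 1)
      (fun b (c : Int × Int) => pvUnionStep b (c.1 * (grid.length:Int) + c.2)
        ((pvGetMin grid c.1 c.2 (grid.length:Int)).1 * (grid.length:Int) +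
          (pvGetMin grid c.1 c.2 (grid.length:Int)).2))
      (PySem.List.pyRange 0 ((grid.length:Int)^2) 1)
    dsimp only at HN
    rw [HN]
    rw [PySem.List.foldl_congr_mem _ _
      (fun b (c : Int × Int) => pvUnionStep b (c.1 * (grid.length:Int) + c.2)
        (pvFm grid (c.1 * (grid.length:Int) + c.2))) _
      (by
        intro acc c hc
        have hv := pvMemP grid.length hc
        have he := pvFm_enc grid hv.1 hv.2.1 hv.2.2.1 hv.2.2.2
        unfold pvEncK at he
        rw [← he])]
    rw [show (fun (b : List Int) (c : Int × Int) => pvUnionStep b (c.1 * (grid.length:Int) + c.2)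
        (pvFm grid (c.1 * (grid.length:Int) + c.2))) =
      (fun (b : List Int) (c : Int × Int) =>
        (fun (b : List Int) (z : Int) => pvUnionStep b z (pvFm grid z)) b
          ((fun (c : Int × Int) => c.1 * (grid.length:Int) + c.2) c)) from rfl,
      ← List.foldl_map (f := fun (c : Int × Int) => c.1 * (grid.length:Int) + c.2)
        (g := fun (b : List Int) (z : Int) => pvUnionStep b z (pvFm grid z))]
    rw [pvPairsEnc grid.length grid.length, hmul, hsq]
    rfl
  unfold calculateBasins
  simp only [PySem.List.len_eq]
  rw [hb, hmul]
  refine congrArg (fun L => PySem.List.sorted (PySem.Dict.counter L).values (fun x => x) true) ?_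
  apply List.map_congr_left
  intro u hu
  rw [PySem.List.mem_pyRange_one] at hu
  have hfix : pvPf (pvBN grid) ((pvPf (pvBN grid))^[pvNN grid] u) = (pvPf (pvBN grid))^[pvNN grid] u := by
    rw [← Function.iterate_succ_apply' (pvPf (pvBN grid)) (pvNN grid) u]
    exact (show (pvPf (pvBN grid))^[pvNN grid] u = (pvPf (pvBN grid))^[pvNN grid + 1] u from hst u hu.1 hu.2).symm
  rw [show (pvBN grid).length = pvNN grid from hlen]
  exact pvFindA_eq (pvBN grid) (pvNN grid) (pvNN grid + 1) u hfix le_rfl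

-- ---------- reduction of port B to canonical form ----------

theorem pvBside (grid : List (List Int)) :
    calculateBasins_alt grid = PySem.List.sorted
      (PySem.Dict.counter ((PySem.List.pyRange 0 ((pvNN grid:Nat):Int) 1).map
        (fun z => pvDecK grid.length ((pvFm grid)^[pvNN grid] z)))).values (fun x => x) true := by
  have hmul : (grid.length:Int) * (grid.length:Int) = ((pvNN grid:Nat):Int) := by
    unfold pvNN; push_cast; ring
  have hb : (PySem.List.pyRange 0 (grid.length:Int) 1).foldl
      (fun (d : PySem.Dict (Int × Int) Int) i => (PySem.List.pyRange 0 (grid.length:Int) 1).foldl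
        (fun (d : PySem.Dict (Int × Int) Int) j =>
          d.insert (pvChase grid (grid.length:Int) (grid.length * grid.length + 1) (i, j))
            (d.getD (pvChase grid (grid.length:Int) (grid.length * grid.length + 1) (i, j)) 0 + 1)) d)
      PySem.Dict.empty
      = PySem.Dict.counter ((PySem.List.pyRange 0 ((pvNN grid:Nat):Int) 1).map
          (fun z => pvDecK grid.length ((pvFm grid)^[pvNN grid] z))) := by
    have HN := pvNestedFold (PySem.List.pyRange 0 (grid.length:Int) 1)
      (PySem.List.pyRange 0 (grid.length:Int) 1)
      (fun (d : PySem.Dict (Int × Int) Int) (c : Int × Int) =>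
        d.insert (pvChase grid (grid.length:Int) (grid.length * grid.length + 1) c)
          (d.getD (pvChase grid (grid.length:Int) (grid.length * grid.length + 1) c) 0 + 1))
      PySem.Dict.empty
    rw [HN]
    rw [PySem.List.foldl_congr_mem _ _
      (fun (d : PySem.Dict (Int × Int) Int) (c : Int × Int) =>
        d.insert (pvDecK grid.length ((pvFm grid)^[pvNN grid] (c.1 * (grid.length:Int) + c.2)))
          (d.getD (pvDecK grid.length ((pvFm grid)^[pvNN grid] (c.1 * (grid.length:Int) + c.2))) 0 + 1)) _
      (by
        intro acc c hc
        have hv := pvMemP grid.length hc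
        have he := pvChase_eq grid (pvNN grid) (grid.length * grid.length + 1) c
          hv.1 hv.2.1 hv.2.2.1 hv.2.2.2 (pvFm_stab grid (pvEncK grid.length c)) le_rfl
        unfold pvEncK at he
        rw [he])]
    rw [show (fun (d : PySem.Dict (Int × Int) Int) (c : Int × Int) =>
        d.insert (pvDecK grid.length ((pvFm grid)^[pvNN grid] (c.1 * (grid.length:Int) + c.2)))
          (d.getD (pvDecK grid.length ((pvFm grid)^[pvNN grid] (c.1 * (grid.length:Int) + c.2))) 0 + 1)) =
      (fun (d : PySem.Dict (Int × Int) Int) (c : Int × Int) =>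
        (fun (d : PySem.Dict (Int × Int) Int) (x : Int × Int) => d.insert x (d.getD x 0 + 1)) d
          ((fun (c : Int × Int) => pvDecK grid.length ((pvFm grid)^[pvNN grid] (c.1 * (grid.length:Int) + c.2))) c)) from rfl,
      ← List.foldl_map (f := fun (c : Int × Int) => pvDecK grid.length ((pvFm grid)^[pvNN grid] (c.1 * (grid.length:Int) + c.2)))
        (g := fun (d : PySem.Dict (Int × Int) Int) (x : Int × Int) => d.insert x (d.getD x 0 + 1))]
    rw [PySem.Dict.foldl_insert_getD_add_one_eq_counter]
    congr 1
    rw [show (fun (c : Int × Int) => pvDecK grid.length ((pvFm grid)^[pvNN grid] (c.1 * (grid.length:Int) + c.2))) =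
      (fun (z : Int) => pvDecK grid.length ((pvFm grid)^[pvNN grid] z)) ∘
        (fun (c : Int × Int) => c.1 * (grid.length:Int) + c.2) from rfl]
    rw [← List.map_map, pvPairsEnc grid.length grid.length, hmul]
  unfold calculateBasins_alt
  simp only [PySem.List.len_eq]
  rw [hb]

-- ===== VERDICT (by name: the statement is the Claim_ definition above) =====
theorem calculateBasins_spec : Claim_equal_calculateBasins := by
  intro grid _ _
  show calculateBasins grid = calculateBasins_alt grid
  rw [pvAside, pvBside]
  obtain ⟨hlen0, hcl0, hst0, hker0⟩ := pvLoopInv grid (pvNN grid) le_rfl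
  have hcl : ∀ z, 0 ≤ z → z < (pvNN grid : Int) →
      0 ≤ pvPf (pvBN grid) z ∧ pvPf (pvBN grid) z < (pvNN grid : Int) := hcl0
  have hst : ∀ z, 0 ≤ z → z < (pvNN grid : Int) →
      (pvPf (pvBN grid))^[pvNN grid] z = (pvPf (pvBN grid))^[pvNN grid + 1] z := hst0
  have hker : ∀ x y, 0 ≤ x → x < (pvNN grid : Int) → 0 ≤ y → y < (pvNN grid : Int) →
      (pvRootm grid (pvBN grid) x = pvRootm grid (pvBN grid) y ↔
        pvCm grid (pvNN grid) x = pvCm grid (pvNN grid) y) := hker0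
  have hCN : ∀ w, pvCm grid (pvNN grid) w = (pvFm grid)^[pvNN grid] w := by
    intro w
    show (pvGm grid (pvNN grid))^[pvNN grid] w = _
    rw [pvGm_eq_fm]
  have hroot_fix : ∀ z, 0 ≤ z → z < (pvNN grid : Int) →
      pvPf (pvBN grid) (pvRootm grid (pvBN grid) z) = pvRootm grid (pvBN grid) z := by
    intro z h1 h2
    show pvPf (pvBN grid) ((pvPf (pvBN grid))^[pvNN grid] z) = (pvPf (pvBN grid))^[pvNN grid] z
    rw [← Function.iterate_succ_apply' (pvPf (pvBN grid)) (pvNN grid) z]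
    exact (hst z h1 h2).symm
  have hroot_range : ∀ z, 0 ≤ z → z < (pvNN grid : Int) →
      0 ≤ pvRootm grid (pvBN grid) z ∧ pvRootm grid (pvBN grid) z < (pvNN grid : Int) :=
    fun z h1 h2 => pvIterRange hcl (pvNN grid) z h1 h2
  have hidem : ∀ z, 0 ≤ z → z < (pvNN grid : Int) →
      pvRootm grid (pvBN grid) (pvRootm grid (pvBN grid) z) = pvRootm grid (pvBN grid) z :=
    fun z h1 h2 => Function.iterate_fixed (hroot_fix z h1 h2) (pvNN grid)
  refine congrArg (fun V => PySem.List.sorted V (fun x => x) true) ?_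
  have hLB : (PySem.List.pyRange 0 ((pvNN grid:Nat):Int) 1).map
        (fun z => pvDecK grid.length ((pvFm grid)^[pvNN grid] z)) =
      ((PySem.List.pyRange 0 ((pvNN grid:Nat):Int) 1).map (fun u => pvRootm grid (pvBN grid) u)).map
        (fun r => pvDecK grid.length ((pvFm grid)^[pvNN grid] r)) := by
    rw [List.map_map]
    apply List.map_congr_left
    intro z hz
    rw [PySem.List.mem_pyRange_one] at hz
    simp only [Function.comp]
    congr 1
    have h1 := (hker (pvRootm grid (pvBN grid) z) z (hroot_range z hz.1 hz.2).1
      (hroot_range z hz.1 hz.2).2 hz.1 hz.2).1 (hidem z hz.1 hz.2)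
    rw [hCN, hCN] at h1
    exact h1.symm
  rw [hLB]
  refine (pvCounterValuesMap _ _ ?_).symm
  intro x hx y hy hg
  obtain ⟨zx, hzx, rfl⟩ := List.mem_map.1 hx
  obtain ⟨zy, hzy, rfl⟩ := List.mem_map.1 hy
  rw [PySem.List.mem_pyRange_one] at hzx hzy
  have henc := congrArg (pvEncK grid.length) hg
  rw [pvEnc_dec, pvEnc_dec] at henc
  rw [← hCN, ← hCN] at henc
  have hR := (hker (pvRootm grid (pvBN grid) zx) (pvRootm grid (pvBN grid) zy)
    (hroot_range zx hzx.1 hzx.2).1 (hroot_range zx hzx.1 hzx.2).2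
    (hroot_range zy hzy.1 hzy.2).1 (hroot_range zy hzy.1 hzy.2).2).2 henc
  rw [hidem zx hzx.1 hzx.2, hidem zy hzy.1 hzy.2] at hR
  exact hR
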